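-- pv_equiv track=rewrite | github.com/andriiglukhyi/codewars | dashatize/solution.py | dashatize
-- ===== SOURCE A (Python) =====
-- def dashatize(num):
--     a = ''
--     if num == None:
--         return 'None'
--     else:
--         num = abs(num)
--         for item in list(str(num)):
--             if int(item)%2 == 1:
--                 a+= '-'+item+'-'
--             else:
--                 a+=item
--         b = a.replace('--', '-')
--     return b.strip('-')
-- ===== SOURCE B (Python) =====
-- def dashatize(num):
--     if num is None:
--         return 'None'
--     s = str(abs(num))
--     out = [s[0]]
--     for prev, cur in zip(s, s[1:]):
--         if int(prev) % 2 == 1 or int(cur) % 2 == 1: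
--             out.append('-')
--         out.append(cur)
--     return ''.join(out)
-- ===== Notes on version B (the rewrite author's own statement) =====
-- stated objective: simpler
-- what changed: B replaces A's wrap-every-odd-digit-in-dashes then collapse '--' and strip('-') pipeline with a single pass that emits one '-' between each adjacent digit pair when either digit is odd, so no replace/strip post-processing exists.
import Mathlib
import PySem

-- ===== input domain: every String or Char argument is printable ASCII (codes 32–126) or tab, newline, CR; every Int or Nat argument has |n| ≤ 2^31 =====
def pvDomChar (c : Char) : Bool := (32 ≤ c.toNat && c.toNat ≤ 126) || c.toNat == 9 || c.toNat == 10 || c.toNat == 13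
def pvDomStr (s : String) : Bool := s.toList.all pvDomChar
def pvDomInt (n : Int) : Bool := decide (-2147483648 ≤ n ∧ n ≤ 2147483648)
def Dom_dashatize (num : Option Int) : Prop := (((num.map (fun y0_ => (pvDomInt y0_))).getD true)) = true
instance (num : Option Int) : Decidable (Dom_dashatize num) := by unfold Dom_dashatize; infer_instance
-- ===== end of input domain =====

-- B builds the dashed string in one pass over adjacent digit pairs instead of A's
-- wrap-in-dashes / collapse '--' / strip('-') pipeline (objective: simpler).

-- ===== PORT A =====
-- int(item) % 2 == 1 is ported as (c.toNat - 48) % 2 == 1, exact on the decimal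
-- digit characters that str(abs(num)) produces.
def dashatize (num : Option Int) : String :=
  match num with
  | none => "None"
  | some n =>
    let s := PySem.Int.toChars ((n.natAbs : Int))
    let a := s.foldl
      (fun acc c =>
        if ((c.toNat : Int) - 48) % 2 == 1 then acc ++ ['-', c, '-'] else acc ++ [c])
      ([] : List Char)
    let b := PySem.Chars.replace a ['-', '-'] ['-']
    String.ofList (PySem.Chars.stripChars b ['-'])

-- ===== PORT B =====
-- the loop over zip(s, s[1:]): emit '-' before cur when prev or cur is odd, then cur
def dashPairs (prev : Char) (rest : List Char) : List Char :=
  match rest with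
  | [] => []
  | c :: t =>
    (if (((prev.toNat : Int) - 48) % 2 == 1) || (((c.toNat : Int) - 48) % 2 == 1)
      then ['-', c] else [c]) ++ dashPairs c t

def dashatize_alt (num : Option Int) : String :=
  match num with
  | none => "None"
  | some n =>
    match PySem.Int.toChars ((n.natAbs : Int)) with
    | [] => ""   -- unreachable: str(abs(num)) is never empty (s[0] always exists)
    | h :: t => String.ofList (h :: dashPairs h t)

-- ===== PRECONDITION & SPEC =====
def Spec_dashatize (num : Option Int) (out : String) : Prop := out = dashatize_alt num
instance (num : Option Int) (out : String) : Decidable (Spec_dashatize num out) := by unfold Spec_dashatize; infer_instance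

-- ===== CLAIM (what is proved, stated in full; the proofs are below) =====
def Claim_equal_dashatize : Prop := ∀ (num : Option Int), Dom_dashatize num → Spec_dashatize num (dashatize num)

-- ===== LEMMAS AND PROOFS =====

-- a character is a decimal digit
def isDig (c : Char) : Prop := 48 ≤ c.toNat ∧ c.toNat ≤ 57

-- shorthand for the shared parity test
def oddC (c : Char) : Bool := ((c.toNat : Int) - 48) % 2 == 1

-- A's per-digit block
def wrapC (c : Char) : List Char := if oddC c then ['-', c, '-'] else [c]

-- natural recursive form of str.replace('--', '-')
def collapse : List Char → List Char
  | [] => []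
  | [c] => [c]
  | c :: b :: t =>
    if c = '-' ∧ b = '-' then '-' :: collapse t else c :: collapse (b :: t)
  termination_by l => l.length

theorem isDig_ne_dash {c : Char} (h : isDig c) : c ≠ '-' := by
  rintro rfl; simp [isDig] at h

theorem foldl_wrap (l : List Char) (acc : List Char) :
    l.foldl (fun acc c =>
        if ((c.toNat : Int) - 48) % 2 == 1 then acc ++ ['-', c, '-'] else acc ++ [c]) acc
      = acc ++ l.flatMap wrapC := by
  induction l generalizing acc with
  | nil => simp
  | cons c t ih =>
    have hb : (if (((c.toNat : Int) - 48) % 2 == 1) = true then acc ++ ['-', c, '-'] else acc ++ [c])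
        = acc ++ wrapC c := by
      simp only [wrapC, oddC]; split <;> simp_all
    rw [List.foldl_cons, hb, ih]; simp

theorem collapse_dd (t : List Char) : collapse ('-' :: '-' :: t) = '-' :: collapse t := by
  rw [collapse, if_pos ⟨rfl, rfl⟩]

theorem collapse_cons_ne {c : Char} (t : List Char) (h : c ≠ '-') :
    collapse (c :: t) = c :: collapse t := by
  cases t with
  | nil => simp [collapse]
  | cons b t' => rw [collapse, if_neg (fun hab => h hab.1)]

theorem collapse_dash_cons {c : Char} (t : List Char) (h : c ≠ '-') :
    collapse ('-' :: c :: t) = '-' :: collapse (c :: t) := by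
  rw [collapse, if_neg (fun hab => h hab.2)]

theorem replace_go_eq (fuel : Nat) : ∀ (l acc : List Char), l.length ≤ fuel →
    PySem.Chars.replace.go ['-', '-'] ['-'] fuel l acc = acc.reverse ++ collapse l := by
  induction fuel with
  | zero =>
    intro l acc h
    have : l = [] := List.eq_nil_of_length_eq_zero (Nat.le_zero.mp h)
    subst this; simp [PySem.Chars.replace.go, collapse]
  | succ f ih =>
    intro l acc h
    cases l with
    | nil => simp [PySem.Chars.replace.go, collapse]
    | cons c t =>
      rw [PySem.Chars.replace.go]
      by_cases hp : (['-', '-'] : List Char).IsPrefix (c :: t)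
      · obtain ⟨r, hr⟩ := hp
        rw [List.cons_append, List.cons_append, List.nil_append] at hr
        injection hr with h1 h2
        subst h1; subst h2
        have hpre : (['-', '-'] : List Char).isPrefixOf ('-' :: '-' :: r) = true := by
          simp [List.isPrefixOf]
        rw [if_pos hpre]
        have hlen : r.length ≤ f := by simp at h; omega
        rw [show List.drop (['-','-'] : List Char).length ('-' :: '-' :: r) = r from rfl]
        rw [ih r _ hlen]
        rw [collapse_dd]; simp
      · have hpre : (['-', '-'] : List Char).isPrefixOf (c :: t) = false := by
          rw [Bool.eq_false_iff]; intro hc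
          exact hp (List.isPrefixOf_iff_prefix.mp hc)
        rw [if_neg (by simp [hpre])]
        have hlen : t.length ≤ f := by simp at h; omega
        rw [ih t _ hlen]
        have : collapse (c :: t) = c :: collapse t := by
          by_cases hc : c = '-'
          · subst hc
            cases t with
            | nil => simp [collapse]
            | cons b t' =>
              by_cases hb : b = '-'
              · subst hb; exact absurd ⟨t', rfl⟩ hp
              · exact collapse_dash_cons t' hb
          · exact collapse_cons_ne t hc
        rw [this]; simp

theorem replace_eq_collapse (l : List Char) :
    PySem.Chars.replace l ['-', '-'] ['-'] = collapse l := by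
  rw [PySem.Chars.replace]
  rw [if_neg (by simp)]
  simpa using replace_go_eq l.length l [] (le_refl _)

-- the core: collapsing A's blocks, with a pending dash when prev is odd
theorem collapse_blocks (t : List Char) : ∀ (prev : Char), isDig prev → (∀ c ∈ t, isDig c) →
    collapse ((if oddC prev then ['-'] else []) ++ t.flatMap wrapC)
      = dashPairs prev t ++ (if oddC (t.getLastD prev) then ['-'] else []) := by
  induction t with
  | nil =>
    intro prev _ _
    simp [dashPairs]
    split <;> simp [collapse]
  | cons c t' ih =>
    intro prev hprev hdig
    have hc : isDig c := hdig c (by simp)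
    have hdig' : ∀ x ∈ t', isDig x := fun x hx => hdig x (by simp [hx])
    have hcne : c ≠ '-' := isDig_ne_dash hc
    have step : collapse ((if oddC prev then ['-'] else []) ++ (c :: t').flatMap wrapC)
        = (if oddC prev || oddC c then ['-', c] else [c])
          ++ collapse ((if oddC c then ['-'] else []) ++ t'.flatMap wrapC) := by
      simp only [List.flatMap_cons, wrapC]
      by_cases hp : oddC prev = true <;> by_cases hco : oddC c = true <;>
        simp [hp, hco, collapse_cons_ne, collapse_dash_cons, hcne, collapse]
    rw [step, ih c hc hdig']
    have : (c :: t').getLastD prev = t'.getLastD c := by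
      cases t' <;> simp [List.getLastD]
    rw [this]
    simp [dashPairs, oddC]

theorem getLastD_append_cons (l1 l2 : List Char) (c d : Char) :
    (l1 ++ c :: l2).getLastD d = (c :: l2).getLastD d := by
  rw [List.getLastD_eq_getLast?, List.getLastD_eq_getLast?, List.getLast?_append]
  cases hgl : (c :: l2).getLast? with
  | none => rw [List.getLast?_eq_none_iff] at hgl; exact absurd hgl (by simp)
  | some a => simp

theorem dashPairs_getLast (t : List Char) : ∀ (prev : Char),
    (prev :: dashPairs prev t).getLastD '-' = t.getLastD prev := by
  induction t with
  | nil => intro prev; simp [dashPairs]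
  | cons c t' ih =>
    intro prev
    have : (prev :: dashPairs prev (c :: t'))
        = (prev :: (if oddC prev || oddC c then ['-'] else [])) ++ (c :: dashPairs c t') := by
      simp [dashPairs, oddC]; split <;> simp
    rw [this, getLastD_append_cons, ih c]
    cases t' <;> simp [List.getLastD]

theorem strip_core (h : Char) (t : List Char) (hh : isDig h) (hdig : ∀ c ∈ t, isDig c) :
    PySem.Chars.stripChars
      ((if oddC h then ['-'] else []) ++ (h :: dashPairs h t)
        ++ (if oddC (t.getLastD h) then ['-'] else [])) ['-']
      = h :: dashPairs h t := by
  have hne : h ≠ '-' := isDig_ne_dash hh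
  have hlastdig : isDig (t.getLastD h) := by
    have hm := @List.getLastD_mem_cons Char t h
    rcases List.mem_cons.mp hm with he | hm'
    · rw [he]; exact hh
    · exact hdig _ hm'
  have hlast : (h :: dashPairs h t).getLastD '-' = t.getLastD h := dashPairs_getLast t h
  have hlne : (h :: dashPairs h t).getLastD '-' ≠ '-' := by
    rw [hlast]; exact isDig_ne_dash hlastdig
  simp only [PySem.Chars.stripChars]
  have hp : (['-'] : List Char).contains h = false := by
    simp; exact fun e => hne e
  have hpdash : ((['-'] : List Char).contains '-') = true := by decide
  -- left strip
  have hdrop1 : List.dropWhile (fun c => (['-'] : List Char).contains c)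
      ((if oddC h then ['-'] else []) ++ (h :: dashPairs h t)
        ++ (if oddC (t.getLastD h) then ['-'] else []))
      = (h :: dashPairs h t) ++ (if oddC (t.getLastD h) then ['-'] else []) := by
    by_cases ho : oddC h = true <;>
      simp [ho, hne]
  rw [hdrop1]
  -- right strip
  have hrev : ((h :: dashPairs h t) ++ (if oddC (t.getLastD h) then ['-'] else [])).reverse
      = (if oddC (t.getLastD h) then ['-'] else []) ++ (h :: dashPairs h t).reverse := by
    split <;> simp
  rw [hrev]
  obtain ⟨l', d, hld⟩ : ∃ l' d, h :: dashPairs h t = l' ++ [d] :=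
    ⟨(h :: dashPairs h t).dropLast, (h :: dashPairs h t).getLast (by simp),
      (List.dropLast_append_getLast (by simp)).symm⟩
  have hdne : d ≠ '-' := by
    have : (h :: dashPairs h t).getLastD '-' = d := by rw [hld]; simp
    rw [this] at hlne; exact hlne
  have hpd : (['-'] : List Char).contains d = false := by
    simp; exact fun e => hdne e
  rw [hld]
  have hdrop2 : List.dropWhile (fun c => (['-'] : List Char).contains c)
      ((if oddC (t.getLastD h) then ['-'] else []) ++ (l' ++ [d]).reverse)
      = (l' ++ [d]).reverse := by
    have hrd : (l' ++ [d]).reverse = d :: l'.reverse := by simp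
    rw [hrd]
    by_cases ho : oddC (t.getLastD h) = true <;>
      simp [hdne]
  rw [hdrop2]
  simp

theorem toDigitsCore_exists (fuel : Nat) : ∀ (n : Nat) (acc : List Char),
    ∃ l, Nat.toDigitsCore 10 fuel n acc = l ++ acc := by
  induction fuel with
  | zero => intro n acc; exact ⟨[], by simp [Nat.toDigitsCore]⟩
  | succ f ih =>
    intro n acc
    rw [Nat.toDigitsCore]
    split
    · exact ⟨[(n % 10).digitChar], rfl⟩
    · obtain ⟨l, hl⟩ := ih (n / 10) ((n % 10).digitChar :: acc)
      exact ⟨l ++ [(n % 10).digitChar], by simp [hl]⟩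

theorem digitChar_isDig {d : Nat} (h : d < 10) : isDig d.digitChar := by
  interval_cases d <;> (unfold isDig; decide)

theorem toDigitsCore_isDig (fuel : Nat) : ∀ (n : Nat) (acc : List Char),
    (∀ c ∈ acc, isDig c) → ∀ c ∈ Nat.toDigitsCore 10 fuel n acc, isDig c := by
  induction fuel with
  | zero => intro n acc hacc; simpa [Nat.toDigitsCore] using hacc
  | succ f ih =>
    intro n acc hacc c hc
    rw [Nat.toDigitsCore] at hc
    have hd : isDig (n % 10).digitChar := digitChar_isDig (Nat.mod_lt _ (by norm_num))
    split at hc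
    · rcases List.mem_cons.mp hc with rfl | hm
      · exact hd
      · exact hacc _ hm
    · refine ih (n / 10) _ ?_ c hc
      intro x hx
      rcases List.mem_cons.mp hx with rfl | hm
      · exact hd
      · exact hacc _ hm

theorem toDigits_ne_nil (n : Nat) : Nat.toDigits 10 n ≠ [] := by
  rw [Nat.toDigits, Nat.toDigitsCore]
  split
  · simp
  · obtain ⟨l, hl⟩ := toDigitsCore_exists n (n / 10) [(n % 10).digitChar]
    rw [hl]; simp

theorem toDigits_isDig (n : Nat) : ∀ c ∈ Nat.toDigits 10 n, isDig c :=
  toDigitsCore_isDig (n + 1) n [] (by simp)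

-- ===== VERDICT (by name: the statement is the Claim_ definition above) =====
theorem dashatize_spec : Claim_equal_dashatize := by
  intro num _
  unfold Spec_dashatize dashatize dashatize_alt
  cases num with
  | none => rfl
  | some n =>
    simp only
    have htc : PySem.Int.toChars ((n.natAbs : Int)) = Nat.toDigits 10 n.natAbs := by
      rw [PySem.Int.toChars, if_neg (by omega), Int.toNat_natCast]
    rw [htc]
    cases hds : Nat.toDigits 10 n.natAbs with
    | nil => exact absurd hds (toDigits_ne_nil _)
    | cons h t =>
      have hdig : ∀ c ∈ h :: t, isDig c := by rw [← hds]; exact toDigits_isDig _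
      have hh : isDig h := hdig h (by simp)
      have ht : ∀ c ∈ t, isDig c := fun c hc => hdig c (by simp [hc])
      rw [foldl_wrap, List.nil_append, replace_eq_collapse]
      have hsplit : (h :: t).flatMap wrapC
          = (if oddC h then ['-'] else []) ++ h ::
            ((if oddC h then ['-'] else []) ++ t.flatMap wrapC) := by
        simp only [List.flatMap_cons, wrapC]
        split <;> simp
      rw [hsplit]
      have hstep : collapse ((if oddC h then ['-'] else []) ++ h ::
            ((if oddC h then ['-'] else []) ++ t.flatMap wrapC))
          = (if oddC h then ['-'] else []) ++ h ::
            collapse ((if oddC h then ['-'] else []) ++ t.flatMap wrapC) := by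
        have hne : h ≠ '-' := isDig_ne_dash hh
        split
        · simp only [List.singleton_append]
          rw [collapse_dash_cons _ hne, collapse_cons_ne _ hne]
        · simp only [List.nil_append]
          rw [collapse_cons_ne _ hne]
      rw [hstep, collapse_blocks t h hh ht]
      have := strip_core h t hh ht
      rw [show (if oddC h then ['-'] else []) ++ h ::
            (dashPairs h t ++ (if oddC (t.getLastD h) then ['-'] else []))
          = (if oddC h then ['-'] else []) ++ (h :: dashPairs h t)
            ++ (if oddC (t.getLastD h) then ['-'] else []) by simp]
      rw [this]
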